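-- pv_equiv track=rewrite | github.com/alym00sa-dev/ai-in-education-research-agent | research_assistant/import_wwc_to_neo4j.py | extract_population
-- ===== SOURCE A (Python) =====
-- from typing import Dict, List, Optional
--
-- def extract_population(row: Dict, prefix: str) -> str:
--     """Extract population/grade level."""
--     # Check grade levels
--     if any(row.get(f'{prefix}Grade_{g}') == '1.00' for g in ['PK', 'PS', 'K']):
--         return 'Elementary (PreK-5th)'
--     elif any(row.get(f'{prefix}Grade_{g}') == '1.00' for g in ['1', '2', '3', '4', '5']):
--         return 'Elementary (PreK-5th)'
--     elif any(row.get(f'{prefix}Grade_{g}') == '1.00' for g in ['6', '7', '8']):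
--         return 'Middle School (6th-8th)'
--     elif any(row.get(f'{prefix}Grade_{g}') == '1.00' for g in ['9', '10', '11', '12']):
--         return 'High School (9th-12th)'
--
--     # Check for postsecondary topics
--     if row.get(f'{prefix}Topic_Postsecondary'):
--         return 'Undergraduate'
--
--     return 'not_reported'
-- ===== SOURCE B (Python) =====
-- _GRADES = {
--     'PK': (0, 'Elementary (PreK-5th)'),
--     'PS': (0, 'Elementary (PreK-5th)'),
--     'K': (0, 'Elementary (PreK-5th)'),
--     '1': (0, 'Elementary (PreK-5th)'),
--     '2': (0, 'Elementary (PreK-5th)'),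
--     '3': (0, 'Elementary (PreK-5th)'),
--     '4': (0, 'Elementary (PreK-5th)'),
--     '5': (0, 'Elementary (PreK-5th)'),
--     '6': (1, 'Middle School (6th-8th)'),
--     '7': (1, 'Middle School (6th-8th)'),
--     '8': (1, 'Middle School (6th-8th)'),
--     '9': (2, 'High School (9th-12th)'),
--     '10': (2, 'High School (9th-12th)'),
--     '11': (2, 'High School (9th-12th)'),
--     '12': (2, 'High School (9th-12th)'),
-- }
--
-- def extract_population(row, prefix):
--     """Extract population/grade level."""
--     hits = [rc for g, rc in _GRADES.items() if row.get(f'{prefix}Grade_{g}') == '1.00']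
--     if hits:
--         return min(hits)[1]
--     if row.get(f'{prefix}Topic_Postsecondary'):
--         return 'Undergraduate'
--     return 'not_reported'
-- ===== Notes on version B (the rewrite author's own statement) =====
-- stated objective: alternative
-- what changed: Replaces the four ordered elif scans by a single grade->(rank,category) table, one pass collecting the ranks of set flags, and a min over the collected ranks; the elif precedence becomes the numeric rank order.
import Mathlib
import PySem

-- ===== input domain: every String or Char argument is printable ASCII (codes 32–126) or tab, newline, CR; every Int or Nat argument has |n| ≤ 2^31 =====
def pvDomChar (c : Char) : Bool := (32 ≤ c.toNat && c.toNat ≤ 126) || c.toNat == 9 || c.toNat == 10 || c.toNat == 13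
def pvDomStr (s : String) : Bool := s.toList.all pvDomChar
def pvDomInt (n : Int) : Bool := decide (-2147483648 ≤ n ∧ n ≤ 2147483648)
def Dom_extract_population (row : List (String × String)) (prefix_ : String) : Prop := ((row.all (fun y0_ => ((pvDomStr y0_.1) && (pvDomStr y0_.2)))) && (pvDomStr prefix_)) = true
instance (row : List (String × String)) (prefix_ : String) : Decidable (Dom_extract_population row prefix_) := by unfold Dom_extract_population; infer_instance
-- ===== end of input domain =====

-- ===== PORT A =====
-- Python truthiness of row.get(...): some non-empty string
def truthy : Option String → Bool
  | some s => s != ""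
  | none => false

-- One honest line: B replaces A's four ordered elif scans by a rank table + one collecting pass + min-rank; alternative decomposition, same cost.
def extract_population (row : List (String × String)) (prefix_ : String) : String :=
  if (["PK", "PS", "K"].any (fun g => (PySem.Dict.mk row).get? (prefix_ ++ "Grade_" ++ g) == some "1.00")) then
    "Elementary (PreK-5th)"
  else if (["1", "2", "3", "4", "5"].any (fun g => (PySem.Dict.mk row).get? (prefix_ ++ "Grade_" ++ g) == some "1.00")) then
    "Elementary (PreK-5th)"
  else if (["6", "7", "8"].any (fun g => (PySem.Dict.mk row).get? (prefix_ ++ "Grade_" ++ g) == some "1.00")) then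
    "Middle School (6th-8th)"
  else if (["9", "10", "11", "12"].any (fun g => (PySem.Dict.mk row).get? (prefix_ ++ "Grade_" ++ g) == some "1.00")) then
    "High School (9th-12th)"
  else if truthy ((PySem.Dict.mk row).get? (prefix_ ++ "Topic_Postsecondary")) then
    "Undergraduate"
  else
    "not_reported"

-- ===== PORT B =====
-- the _GRADES table of Source B: grade label -> (rank, category)
def gradeTable : List (String × Int × String) :=
  [("PK", 0, "Elementary (PreK-5th)"), ("PS", 0, "Elementary (PreK-5th)"),
   ("K", 0, "Elementary (PreK-5th)"), ("1", 0, "Elementary (PreK-5th)"),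
   ("2", 0, "Elementary (PreK-5th)"), ("3", 0, "Elementary (PreK-5th)"),
   ("4", 0, "Elementary (PreK-5th)"), ("5", 0, "Elementary (PreK-5th)"),
   ("6", 1, "Middle School (6th-8th)"), ("7", 1, "Middle School (6th-8th)"),
   ("8", 1, "Middle School (6th-8th)"),
   ("9", 2, "High School (9th-12th)"), ("10", 2, "High School (9th-12th)"),
   ("11", 2, "High School (9th-12th)"), ("12", 2, "High School (9th-12th)")]

-- the list comprehension of Source B: collect (rank, category) of every set grade flag
def collectHits (row : List (String × String)) (prefix_ : String) :
    List (String × Int × String) → List (Int × String)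
  | [] => []
  | (g, rc) :: rest =>
    if (PySem.Dict.mk row).get? (prefix_ ++ "Grade_" ++ g) == some "1.00" then
      rc :: collectHits row prefix_ rest
    else
      collectHits row prefix_ rest

-- Python's min on (rank, category) tuples: lexicographic, first minimum kept
def pairMin (a b : Int × String) : Int × String :=
  if b.1 < a.1 ∨ (b.1 = a.1 ∧ b.2 < a.2) then b else a

def extract_population_alt (row : List (String × String)) (prefix_ : String) : String :=
  match collectHits row prefix_ gradeTable with
  | h :: t => (t.foldl pairMin h).2
  | [] =>
    if truthy ((PySem.Dict.mk row).get? (prefix_ ++ "Topic_Postsecondary")) then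
      "Undergraduate"
    else
      "not_reported"

-- ===== PRECONDITION & SPEC =====
def Spec_extract_population (row : List (String × String)) (prefix_ : String) (out : String) : Prop := out = extract_population_alt row prefix_
instance (row : List (String × String)) (prefix_ : String) (out : String) : Decidable (Spec_extract_population row prefix_ out) := by unfold Spec_extract_population; infer_instance

-- ===== CLAIM (what is proved, stated in full; the proofs are below) =====
def Claim_equal_extract_population : Prop := ∀ (row : List (String × String)) (prefix_ : String), Dom_extract_population row prefix_ → Spec_extract_population row prefix_ (extract_population row prefix_)

-- ===== LEMMAS AND PROOFS =====

def rcElem : Int × String := (0, "Elementary (PreK-5th)")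
def rcMid  : Int × String := (1, "Middle School (6th-8th)")
def rcHigh : Int × String := (2, "High School (9th-12th)")

theorem gradeTable_decomp :
    gradeTable =
      (["PK", "PS", "K"].map (fun g => (g, rcElem)) ++
        ["1", "2", "3", "4", "5"].map (fun g => (g, rcElem))) ++
      ["6", "7", "8"].map (fun g => (g, rcMid)) ++
      ["9", "10", "11", "12"].map (fun g => (g, rcHigh)) := rfl

theorem collect_append (row : List (String × String)) (prefix_ : String)
    (l₁ l₂ : List (String × Int × String)) :
    collectHits row prefix_ (l₁ ++ l₂) =
      collectHits row prefix_ l₁ ++ collectHits row prefix_ l₂ := by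
  induction l₁ with
  | nil => rfl
  | cons a l ih =>
    obtain ⟨g, rc⟩ := a
    by_cases h : ((PySem.Dict.mk row).get? (prefix_ ++ "Grade_" ++ g) == some "1.00") = true <;>
      simp [collectHits, h, ih]

theorem collect_map_const (row : List (String × String)) (prefix_ : String)
    (rc : Int × String) (gs : List String) :
    collectHits row prefix_ (gs.map (fun g => (g, rc))) =
      (gs.filter (fun g =>
        (PySem.Dict.mk row).get? (prefix_ ++ "Grade_" ++ g) == some "1.00")).map (fun _ => rc) := by
  induction gs with
  | nil => rfl
  | cons g gs ih =>
    by_cases h : ((PySem.Dict.mk row).get? (prefix_ ++ "Grade_" ++ g) == some "1.00") = true <;>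
      simp [collectHits, h, ih]

theorem foldl_pairMin_id (h : Int × String) (t : List (Int × String))
    (H : ∀ x ∈ t, pairMin h x = h) : t.foldl pairMin h = h := by
  induction t with
  | nil => rfl
  | cons x t ih =>
    rw [List.foldl_cons, H x (List.mem_cons_self ..)]
    exact ih fun y hy => H y (List.mem_cons_of_mem _ hy)

theorem filter_nil_of_not_any (f : String → Bool) (l : List String)
    (h : l.any f = false) : l.filter f = [] := by
  simp only [List.any_eq_false] at h
  simpa [List.filter_eq_nil_iff] using h

theorem filter_ne_nil_of_any (f : String → Bool) (l : List String)
    (h : l.any f = true) : l.filter f ≠ [] := by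
  simp only [List.any_eq_true] at h
  obtain ⟨g, hg, hfg⟩ := h
  simp only [ne_eq, List.filter_eq_nil_iff, not_forall]
  exact ⟨g, hg, by simp [hfg]⟩

theorem filter_nil_of_not_any' (f : String → Bool) (l : List String)
    (h : ¬ l.any f = true) : l.filter f = [] :=
  filter_nil_of_not_any f l (by simpa using h)

theorem pairMin_self (a : Int × String) : pairMin a a = a := by
  unfold pairMin
  rw [if_neg]
  rintro (h | ⟨-, h⟩) <;> exact lt_irrefl _ h

theorem pairMin_of_lt (a b : Int × String) (h : a.1 < b.1) : pairMin a b = a := by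
  unfold pairMin
  rw [if_neg]
  rintro (h' | ⟨h', -⟩) <;> omega

theorem fold_snd (rc : Int × String) (t : List (Int × String))
    (H : ∀ x ∈ t, pairMin rc x = rc) : (t.foldl pairMin rc).2 = rc.2 := by
  rw [foldl_pairMin_id rc t H]

theorem extract_population_spec : Claim_equal_extract_population := by
  intro row prefix_ _
  show extract_population row prefix_ = extract_population_alt row prefix_
  unfold extract_population extract_population_alt
  rw [gradeTable_decomp, collect_append, collect_append, collect_append,
    collect_map_const, collect_map_const, collect_map_const, collect_map_const]
  set f : String → Bool := fun g =>
    (PySem.Dict.mk row).get? (prefix_ ++ "Grade_" ++ g) == some "1.00" with hf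
  by_cases h1 : (["PK", "PS", "K"].any f) = true
  · -- a PK/PS/K flag is set: both sides give Elementary
    obtain ⟨g0, t0, hk⟩ := List.exists_cons_of_ne_nil (filter_ne_nil_of_any f _ h1)
    rw [h1, if_pos rfl, hk]
    simp only [List.map_cons, List.cons_append]
    refine (fold_snd rcElem _ ?_).symm
    intro x hx
    simp only [List.mem_append, List.mem_map] at hx
    rcases hx with ((⟨_, _, rfl⟩ | ⟨_, _, rfl⟩) | ⟨_, _, rfl⟩) | ⟨_, _, rfl⟩ <;>
      first
      | exact pairMin_self _
      | (apply pairMin_of_lt; norm_num [rcElem, rcMid, rcHigh])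
  · rw [if_neg (by simpa using h1), filter_nil_of_not_any' f _ h1]
    by_cases h2 : (["1", "2", "3", "4", "5"].any f) = true
    · -- a 1..5 flag is set: Elementary
      obtain ⟨g0, t0, hk⟩ := List.exists_cons_of_ne_nil (filter_ne_nil_of_any f _ h2)
      rw [h2, if_pos rfl, hk]
      simp only [List.map_nil, List.map_cons, List.nil_append, List.cons_append]
      refine (fold_snd rcElem _ ?_).symm
      intro x hx
      simp only [List.mem_append, List.mem_map] at hx
      rcases hx with (⟨_, _, rfl⟩ | ⟨_, _, rfl⟩) | ⟨_, _, rfl⟩ <;>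
      first
      | exact pairMin_self _
      | (apply pairMin_of_lt; norm_num [rcElem, rcMid, rcHigh])
    · rw [if_neg (by simpa using h2), filter_nil_of_not_any' f _ h2]
      by_cases h3 : (["6", "7", "8"].any f) = true
      · -- a 6..8 flag is set: Middle School
        obtain ⟨g0, t0, hk⟩ := List.exists_cons_of_ne_nil (filter_ne_nil_of_any f _ h3)
        rw [h3, if_pos rfl, hk]
        simp only [List.map_nil, List.map_cons, List.nil_append, List.cons_append]
        refine (fold_snd rcMid _ ?_).symm
        intro x hx
        simp only [List.mem_append, List.mem_map] at hx
        rcases hx with ⟨_, _, rfl⟩ | ⟨_, _, rfl⟩ <;>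
      first
      | exact pairMin_self _
      | (apply pairMin_of_lt; norm_num [rcElem, rcMid, rcHigh])
      · rw [if_neg (by simpa using h3), filter_nil_of_not_any' f _ h3]
        by_cases h4 : (["9", "10", "11", "12"].any f) = true
        · -- a 9..12 flag is set: High School
          obtain ⟨g0, t0, hk⟩ := List.exists_cons_of_ne_nil (filter_ne_nil_of_any f _ h4)
          rw [h4, if_pos rfl, hk]
          simp only [List.map_nil, List.map_cons, List.nil_append]
          refine (fold_snd rcHigh _ ?_).symm
          intro x hx
          simp only [List.mem_map] at hx
          obtain ⟨_, _, rfl⟩ := hx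
          exact pairMin_self _
        · -- no grade flag set: both fall through to the postsecondary check
          rw [if_neg (by simpa using h4), filter_nil_of_not_any' f _ h4]
          rfl
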